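-- pv_equiv track=rewrite | github.com/awdadawdad/novel-image-encryption-using-ECC-and-DNA-computing | ECC_CHAOS.py | DNA_addition
-- ===== SOURCE A (Python) =====
-- def DNA_addition(DNA1, DNA2):
--     result = ''
--     for i in range(4):
--         if DNA1[i] == 'A':
--             if   DNA2[i] == 'A' :
--                  result += 'A'
--             elif DNA2[i] == 'G':
--                  result += 'G'
--             elif DNA2[i] == 'C':
--                  result += 'C'
--             elif DNA2[i] == 'T':
--                  result += 'T'
--         if DNA1[i] == 'G':
--            if   DNA2[i] == 'A' :
--                 result += 'G'
--            elif DNA2[i] == 'G':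
--                 result += 'C'
--            elif DNA2[i] == 'C':
--                 result += 'T'
--            elif DNA2[i] == 'T':
--                 result += 'A'
--         if DNA1[i] == 'C':
--            if   DNA2[i] == 'A' :
--                 result += 'C'
--            elif DNA2[i] == 'G':
--                 result += 'T'
--            elif DNA2[i] == 'C':
--                 result += 'A'
--            elif DNA2[i] == 'T':
--                 result += 'G'
--         if DNA1[i] == 'T':
--            if   DNA2[i] == 'A' :
--                 result += 'T'
--            elif DNA2[i] == 'G':
--                 result += 'A'
--            elif DNA2[i] == 'C':
--                 result += 'G'
--            elif DNA2[i] == 'T':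
--                 result += 'C'
--     return result
-- ===== SOURCE B (Python) =====
-- def DNA_addition(DNA1, DNA2):
--     bases = 'AGCT'
--
--     def go(i):
--         if i == 4:
--             return ''
--         a = bases.find(DNA1[i])
--         if a >= 0:
--             b = bases.find(DNA2[i])
--             if b >= 0:
--                 return bases[(a + b) % 4] + go(i + 1)
--         return go(i + 1)
--
--     return go(0)
-- ===== Notes on version B (the rewrite author's own statement) =====
-- stated objective: simpler
-- what changed: Replaces A's accumulator loop over a 16-branch nested if-table by a recursive descent that builds the result string front-to-back from the closed form 'AGCT'[(a+b)%4] with a=AGCT-index of DNA1[i], b of DNA2[i].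
import Mathlib
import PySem

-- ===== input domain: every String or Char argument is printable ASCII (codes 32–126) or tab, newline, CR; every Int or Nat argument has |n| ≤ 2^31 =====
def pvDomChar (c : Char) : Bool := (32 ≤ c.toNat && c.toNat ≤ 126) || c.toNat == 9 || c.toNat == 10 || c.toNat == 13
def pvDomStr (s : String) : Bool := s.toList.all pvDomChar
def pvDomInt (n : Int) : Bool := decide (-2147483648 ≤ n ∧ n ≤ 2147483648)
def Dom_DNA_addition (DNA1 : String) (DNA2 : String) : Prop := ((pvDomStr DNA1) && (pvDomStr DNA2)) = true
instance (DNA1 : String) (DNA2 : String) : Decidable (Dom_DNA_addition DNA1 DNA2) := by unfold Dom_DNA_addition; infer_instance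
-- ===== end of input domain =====

-- B replaces A's accumulator loop over a 16-branch nested if-table by a recursive descent that
-- builds the string front-to-back from the closed form 'AGCT'[(a+b)%4] (objective: simpler).

-- ===== PORT A =====
-- loop body of A: the four sequential outer ifs, each with its elif chain (exact branch order)
def dnaTableA (result : List Char) (c1 c2 : Char) : List Char :=
  let result :=
    if c1 = 'A' then
      if c2 = 'A' then result ++ ['A']
      else if c2 = 'G' then result ++ ['G']
      else if c2 = 'C' then result ++ ['C']
      else if c2 = 'T' then result ++ ['T']
      else result
    else result
  let result :=
    if c1 = 'G' then
      if c2 = 'A' then result ++ ['G']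
      else if c2 = 'G' then result ++ ['C']
      else if c2 = 'C' then result ++ ['T']
      else if c2 = 'T' then result ++ ['A']
      else result
    else result
  let result :=
    if c1 = 'C' then
      if c2 = 'A' then result ++ ['C']
      else if c2 = 'G' then result ++ ['T']
      else if c2 = 'C' then result ++ ['A']
      else if c2 = 'T' then result ++ ['G']
      else result
    else result
  let result :=
    if c1 = 'T' then
      if c2 = 'A' then result ++ ['T']
      else if c2 = 'G' then result ++ ['A']
      else if c2 = 'C' then result ++ ['G']
      else if c2 = 'T' then result ++ ['C']
      else result
    else result
  result

-- DNA1[i]/DNA2[i] ported as pyGetD: exact under Pre_DNA_addition (the accessed indices are in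
-- range there; when DNA1[i] is not a base, neither program reads DNA2[i], and the default ' '
-- matches no branch).
def DNA_addition (DNA1 : String) (DNA2 : String) : String :=
  String.ofList ((PySem.List.pyRange 0 4 1).foldl
    (fun result i =>
      dnaTableA result (PySem.List.pyGetD DNA1.toList i ' ') (PySem.List.pyGetD DNA2.toList i ' ')) [])

-- ===== PORT B =====
-- B's inner recursive go(i): Python tests 'i == 4'; go is only ever called with i ≤ 4, where
-- that test coincides with the '4 ≤ i' guard used here for termination.
def dnaGoB (s1 s2 : List Char) (i : Nat) : List Char :=
  if 4 ≤ i then []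
  else
    let a := PySem.Str.find "AGCT" (String.ofList [PySem.List.pyGetD s1 i ' '])
    if a ≥ 0 then
      let b := PySem.Str.find "AGCT" (String.ofList [PySem.List.pyGetD s2 i ' '])
      if b ≥ 0 then
        PySem.List.pyGetD ['A', 'G', 'C', 'T'] (PySem.Int.mod (a + b) 4) ' ' :: dnaGoB s1 s2 (i + 1)
      else dnaGoB s1 s2 (i + 1)
    else dnaGoB s1 s2 (i + 1)
termination_by 4 - i

def DNA_addition_alt (DNA1 : String) (DNA2 : String) : String :=
  String.ofList (dnaGoB DNA1.toList DNA2.toList 0)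

-- ===== PRECONDITION & SPEC =====
-- Pre_ is exactly where Python A returns: A indexes DNA1[0..3] unconditionally (IndexError if
-- len < 4) and indexes DNA2[i] exactly when DNA1[i] is one of A/G/C/T.
def Pre_DNA_addition (DNA1 : String) (DNA2 : String) : Prop :=
  4 ≤ DNA1.toList.length ∧
  ∀ i : Nat, i < 4 → DNA1.toList.getD i ' ' ∈ (['A', 'G', 'C', 'T'] : List Char) →
    i < DNA2.toList.length
instance (DNA1 : String) (DNA2 : String) : Decidable (Pre_DNA_addition DNA1 DNA2) := by
  unfold Pre_DNA_addition; infer_instance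

def pvWitness_DNA_addition : String × String := ("AGCT", "TTGA")

def Spec_DNA_addition (DNA1 : String) (DNA2 : String) (out : String) : Prop := out = DNA_addition_alt DNA1 DNA2
instance (DNA1 : String) (DNA2 : String) (out : String) : Decidable (Spec_DNA_addition DNA1 DNA2 out) := by unfold Spec_DNA_addition; infer_instance

-- ===== CLAIM =====
def Claim_equal_DNA_addition : Prop := ∀ (DNA1 : String) (DNA2 : String), Dom_DNA_addition DNA1 DNA2 → Pre_DNA_addition DNA1 DNA2 → Spec_DNA_addition DNA1 DNA2 (DNA_addition DNA1 DNA2)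

-- ===== LEMMAS AND PROOFS =====
-- contribution of one position, in B's closed form
def dnaContrib (c1 c2 : Char) : List Char :=
  let a := PySem.Str.find "AGCT" (String.ofList [c1])
  if a ≥ 0 then
    let b := PySem.Str.find "AGCT" (String.ofList [c2])
    if b ≥ 0 then [PySem.List.pyGetD ['A', 'G', 'C', 'T'] (PySem.Int.mod (a + b) 4) ' '] else []
  else []

theorem find_single_neg (c : Char) (hA : c ≠ 'A') (hG : c ≠ 'G') (hC : c ≠ 'C') (hT : c ≠ 'T') :
    PySem.Str.find "AGCT" (String.ofList [c]) = -1 := by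
  rw [PySem.Str.find_eq_neg_one_iff]
  intro h
  have h' : [c] <:+: "AGCT".toList := by simpa using h
  have hm : c ∈ "AGCT".toList := List.singleton_sublist.mp h'.sublist
  rw [show "AGCT".toList = ['A', 'G', 'C', 'T'] from by decide] at hm
  simp only [List.mem_cons, List.not_mem_nil, or_false] at hm
  rcases hm with h | h | h | h <;> simp_all

theorem contrib_left_nonbase (c1 c2 : Char) (hA : c1 ≠ 'A') (hG : c1 ≠ 'G') (hC : c1 ≠ 'C')
    (hT : c1 ≠ 'T') : dnaContrib c1 c2 = [] := by
  unfold dnaContrib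
  rw [find_single_neg c1 hA hG hC hT]
  simp

theorem contrib_right_nonbase (c1 c2 : Char) (hA : c2 ≠ 'A') (hG : c2 ≠ 'G') (hC : c2 ≠ 'C')
    (hT : c2 ≠ 'T') : dnaContrib c1 c2 = [] := by
  unfold dnaContrib
  rw [find_single_neg c2 hA hG hC hT]
  by_cases ha : PySem.Str.find "AGCT" (String.ofList [c1]) ≥ 0 <;> simp_all

theorem contrib_AA : dnaContrib 'A' 'A' = ['A'] := by decide
theorem contrib_AG : dnaContrib 'A' 'G' = ['G'] := by decide
theorem contrib_AC : dnaContrib 'A' 'C' = ['C'] := by decide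
theorem contrib_AT : dnaContrib 'A' 'T' = ['T'] := by decide
theorem contrib_GA : dnaContrib 'G' 'A' = ['G'] := by decide
theorem contrib_GG : dnaContrib 'G' 'G' = ['C'] := by decide
theorem contrib_GC : dnaContrib 'G' 'C' = ['T'] := by decide
theorem contrib_GT : dnaContrib 'G' 'T' = ['A'] := by decide
theorem contrib_CA : dnaContrib 'C' 'A' = ['C'] := by decide
theorem contrib_CG : dnaContrib 'C' 'G' = ['T'] := by decide
theorem contrib_CC : dnaContrib 'C' 'C' = ['A'] := by decide
theorem contrib_CT : dnaContrib 'C' 'T' = ['G'] := by decide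
theorem contrib_TA : dnaContrib 'T' 'A' = ['T'] := by decide
theorem contrib_TG : dnaContrib 'T' 'G' = ['A'] := by decide
theorem contrib_TC : dnaContrib 'T' 'C' = ['G'] := by decide
theorem contrib_TT : dnaContrib 'T' 'T' = ['C'] := by decide

-- A's loop body appends exactly B's closed-form contribution
theorem table_eq_contrib (res : List Char) (c1 c2 : Char) :
    dnaTableA res c1 c2 = res ++ dnaContrib c1 c2 := by
  by_cases hA : c1 = 'A' <;> by_cases hG : c1 = 'G' <;> by_cases hC : c1 = 'C' <;>
    by_cases hT : c1 = 'T' <;>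
  by_cases kA : c2 = 'A' <;> by_cases kG : c2 = 'G' <;> by_cases kC : c2 = 'C' <;>
    by_cases kT : c2 = 'T' <;>
  simp_all [dnaTableA, contrib_left_nonbase, contrib_right_nonbase,
    contrib_AA, contrib_AG, contrib_AC, contrib_AT, contrib_GA, contrib_GG, contrib_GC,
    contrib_GT, contrib_CA, contrib_CG, contrib_CC, contrib_CT, contrib_TA, contrib_TG,
    contrib_TC, contrib_TT]

-- one step of B's recursion, for i < 4
theorem go_step (s1 s2 : List Char) (i : Nat) (h : i < 4) :
    dnaGoB s1 s2 i =
      dnaContrib (PySem.List.pyGetD s1 i ' ') (PySem.List.pyGetD s2 i ' ') ++ dnaGoB s1 s2 (i + 1) := by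
  rw [dnaGoB]
  simp only [dnaContrib]
  have : ¬ 4 ≤ i := by omega
  simp only [this, if_false]
  split_ifs <;> simp

theorem go_four (s1 s2 : List Char) : dnaGoB s1 s2 4 = [] := by
  rw [dnaGoB]; simp

-- ===== VERDICT =====
theorem DNA_addition_spec : Claim_equal_DNA_addition := by
  intro DNA1 DNA2 _ _
  unfold Spec_DNA_addition DNA_addition DNA_addition_alt
  have hrange : PySem.List.pyRange 0 4 1 = [0, 1, 2, 3] := by decide
  rw [hrange]
  simp only [List.foldl]
  rw [table_eq_contrib, table_eq_contrib, table_eq_contrib, table_eq_contrib]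
  rw [go_step _ _ 0 (by omega), go_step _ _ 1 (by omega), go_step _ _ 2 (by omega),
      go_step _ _ 3 (by omega), go_four]
  simp
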